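-- pv_equiv track=rewrite | github.com/scarpentieri/sentence-alignment | sentence_alignment.py | find_alignments
-- ===== SOURCE A (Python) =====
-- def find_alignments(similarities:list, sentences1:list, sentences2:list, lang1:str, lang2:str):
--
--     aligned = list()
--     aligned_count = 0
--
--     for i, s in enumerate(similarities):
--         if sum(s) == 0:
--             continue
--         elif sum(s) > 0:
--             highest = sorted([(a, b) for a, b in enumerate(s)], key=lambda x: x[1], reverse=True)[0]
--             aligned.append({lang1: sentences1[i], lang2: sentences2[highest[0]]})
--             aligned_count += 1
--
--     return aligned
-- ===== SOURCE B (Python) =====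
-- def find_alignments(similarities: list, sentences1: list, sentences2: list, lang1: str, lang2: str):
--     def argmax(s):
--         # first maximal index: strict '>' so ties keep the earliest index,
--         # matching A's stable descending sort's first element
--         bi, bv = 0, s[0]
--         for j, v in enumerate(s[1:], 1):
--             if v > bv:
--                 bi, bv = j, v
--         return bi
--     return [{lang1: sentences1[i], lang2: sentences2[argmax(s)]}
--             for i, s in enumerate(similarities) if sum(s) > 0]
-- ===== Notes on version B (the rewrite author's own statement) =====
-- stated objective: alternative
-- what changed: Replaces A's accumulator loop with a per-row build-pairs/stable-descending-sort/take-first argmax by a comprehension over rows with positive sum using a single-pass strict-'>' argmax helper that keeps only a best index/value pair, dropping A's sort and the unused aligned_count.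
import Mathlib
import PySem

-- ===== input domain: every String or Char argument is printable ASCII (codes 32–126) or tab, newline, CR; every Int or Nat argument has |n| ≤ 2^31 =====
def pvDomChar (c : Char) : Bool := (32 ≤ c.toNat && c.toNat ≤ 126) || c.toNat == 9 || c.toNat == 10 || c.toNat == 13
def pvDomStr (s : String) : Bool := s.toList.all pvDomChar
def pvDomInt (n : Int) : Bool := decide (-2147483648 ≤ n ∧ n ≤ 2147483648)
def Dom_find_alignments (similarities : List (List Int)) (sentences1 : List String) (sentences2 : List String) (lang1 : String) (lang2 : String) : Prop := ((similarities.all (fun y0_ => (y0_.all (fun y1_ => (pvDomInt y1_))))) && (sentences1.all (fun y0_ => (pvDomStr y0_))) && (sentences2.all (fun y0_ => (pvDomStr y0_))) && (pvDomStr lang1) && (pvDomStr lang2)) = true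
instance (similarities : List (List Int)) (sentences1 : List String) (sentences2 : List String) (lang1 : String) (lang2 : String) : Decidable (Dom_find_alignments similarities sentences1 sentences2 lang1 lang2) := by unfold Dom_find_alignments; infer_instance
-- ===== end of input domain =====

-- B replaces A's accumulator loop with per-row build-pairs/stable-descending-sort/take-first by a
-- comprehension (structural recursion) over positive-sum rows with a single-pass strict-'>' argmax
-- helper; return value only, no mutation involved.

-- ===== PORT A =====
-- the Python dict literal {lang1: t1, lang2: t2}
def pvRowDict (lang1 lang2 t1 t2 : String) : List (String × String) :=
  (((PySem.Dict.empty).insert lang1 t1).insert lang2 t2).items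

def find_alignments (similarities : List (List Int)) (sentences1 : List String) (sentences2 : List String) (lang1 : String) (lang2 : String) : List (List (String × String)) :=
  ((PySem.List.enumerate similarities 0).foldl
    (fun (st : List (List (String × String)) × Int) p =>
      if p.2.sum = 0 then st
      else if p.2.sum > 0 then
        let highest := PySem.List.pyGetD (PySem.List.sorted (PySem.List.enumerate p.2 0) (fun x => x.2) true) 0 ((0 : Int), (0 : Int))
        (st.1 ++ [pvRowDict lang1 lang2 (PySem.List.pyGetD sentences1 p.1 "") (PySem.List.pyGetD sentences2 highest.1 "")], st.2 + 1)
      else st)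
    ([], 0)).1

-- ===== PORT B =====
-- argmax's inner loop: state (bi, bv), strict '>' so the first maximum wins
def pvArgmaxGo (l : List Int) (j bi bv : Int) : Int :=
  match l with
  | [] => bi
  | v :: t => if v > bv then pvArgmaxGo t (j + 1) j v else pvArgmaxGo t (j + 1) bi bv

-- the comprehension: recursion over the rows carrying the enumerate counter i.
-- s.headD 0 transcribes s[0]; a positive-sum row is nonempty, so the default is never used.
def pvAlignGo (sentences1 sentences2 : List String) (lang1 lang2 : String) : List (List Int) → Int → List (List (String × String))
  | [], _ => []
  | s :: rest, i =>
    if 0 < s.sum then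
      (((PySem.Dict.empty).insert lang1 (PySem.List.pyGetD sentences1 i "")).insert lang2
        (PySem.List.pyGetD sentences2 (pvArgmaxGo s.tail 1 0 (s.headD 0)) "")).items
        :: pvAlignGo sentences1 sentences2 lang1 lang2 rest (i + 1)
    else pvAlignGo sentences1 sentences2 lang1 lang2 rest (i + 1)

def find_alignments_alt (similarities : List (List Int)) (sentences1 : List String) (sentences2 : List String) (lang1 : String) (lang2 : String) : List (List (String × String)) :=
  pvAlignGo sentences1 sentences2 lang1 lang2 similarities 0

-- ===== PRECONDITION & SPEC =====
-- Exactly the inputs where the Python A returns: for every row with positive sum, its own index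
-- must be in range of sentences1 and the first-maximum position of the row in range of sentences2
-- (otherwise A raises IndexError).
def Pre_find_alignments (similarities : List (List Int)) (sentences1 : List String) (sentences2 : List String) (lang1 : String) (lang2 : String) : Prop :=
  ∀ k, (hk : k < similarities.length) → 0 < (similarities[k]).sum →
    k < sentences1.length ∧
    ∀ j, (hj : j < (similarities[k]).length) →
      ((∀ m, (hm : m < j) → (similarities[k])[m]'(by omega) < (similarities[k])[j]) ∧
       (∀ m, (hm : m < (similarities[k]).length) → (similarities[k])[m] ≤ (similarities[k])[j])) →
      j < sentences2.length
instance (similarities : List (List Int)) (sentences1 : List String) (sentences2 : List String) (lang1 : String) (lang2 : String) : Decidable (Pre_find_alignments similarities sentences1 sentences2 lang1 lang2) := by unfold Pre_find_alignments; infer_instance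

def pvWitness_find_alignments : List (List Int) × List String × List String × String × String :=
  ([[0, 2, 2], [0, 0], [1, -5]], ["a", "b", "c"], ["x", "y", "z"], "en", "fr")

def Spec_find_alignments (similarities : List (List Int)) (sentences1 : List String) (sentences2 : List String) (lang1 : String) (lang2 : String) (out : List (List (String × String))) : Prop := out = find_alignments_alt similarities sentences1 sentences2 lang1 lang2
instance (similarities : List (List Int)) (sentences1 : List String) (sentences2 : List String) (lang1 : String) (lang2 : String) (out : List (List (String × String))) : Decidable (Spec_find_alignments similarities sentences1 sentences2 lang1 lang2 out) := by unfold Spec_find_alignments; infer_instance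

-- ===== CLAIM (what is proved, stated in full; the proofs are below) =====
def Claim_equal_find_alignments : Prop := ∀ (similarities : List (List Int)) (sentences1 : List String) (sentences2 : List String) (lang1 : String) (lang2 : String), Dom_find_alignments similarities sentences1 sentences2 lang1 lang2 → Pre_find_alignments similarities sentences1 sentences2 lang1 lang2 → Spec_find_alignments similarities sentences1 sentences2 lang1 lang2 (find_alignments similarities sentences1 sentences2 lang1 lang2)

-- ===== LEMMAS AND PROOFS =====

lemma insertBy_cons (bef : Int × Int → Int × Int → Bool) (x h : Int × Int) (t : List (Int × Int)) :
    PySem.List.insertBy bef x (h :: t) =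
      if bef x h then x :: h :: t else h :: PySem.List.insertBy bef x t := by
  simp [PySem.List.insertBy]

-- head of the running insertion sort = running maximum (first extremal wins)
lemma head_foldl_insertBy :
    ∀ (l acc : List (Int × Int)) (h : Int × Int), acc.head? = some h →
      (l.foldl (fun a x => PySem.List.insertBy (fun a b => decide ((fun x : Int × Int => x.2) b < (fun x : Int × Int => x.2) a)) x a) acc).head? =
        some (l.foldl (fun (b : Int × Int) q => if b.2 < q.2 then q else b) h) := by
  intro l
  induction l with
  | nil => intro acc h hacc; simpa using hacc
  | cons x l ih =>
    intro acc h hacc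
    cases acc with
    | nil => simp at hacc
    | cons y t =>
      simp only [List.head?_cons, Option.some.injEq] at hacc
      subst hacc
      simp only [List.foldl_cons]
      apply ih
      rw [insertBy_cons]
      by_cases hb : y.2 < x.2 <;> simp [hb]

-- the running-max fold over an enumerated tail computes B's argmax loop
lemma argmaxGo_eq_foldl :
    ∀ (vs : List Int) (j bi bv : Int),
      ((PySem.List.enumerate vs j).foldl (fun (b : Int × Int) q => if b.2 < q.2 then q else b) (bi, bv)).1 =
        pvArgmaxGo vs j bi bv := by
  intro vs
  induction vs with
  | nil => intro j bi bv; rfl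
  | cons v t ih =>
    intro j bi bv
    rw [PySem.List.enumerate_cons, List.foldl_cons, pvArgmaxGo]
    by_cases h : bv < v
    · rw [if_pos h, if_pos (by omega : v > bv)]; exact ih (j + 1) j v
    · rw [if_neg h, if_neg (by omega : ¬ v > bv)]; exact ih (j + 1) bi bv

-- per row: index of the first element of A's stable descending sort = B's argmax
lemma row_eq (s : List Int) (hs : s ≠ []) :
    (PySem.List.pyGetD (PySem.List.sorted (PySem.List.enumerate s 0) (fun x => x.2) true) 0 ((0 : Int), (0 : Int))).1 =
      pvArgmaxGo s.tail 1 0 (s.headD 0) := by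
  cases s with
  | nil => exact absurd rfl hs
  | cons v vs =>
    have henum : PySem.List.enumerate (v :: vs) (0 : Int) = ((0 : Int), v) :: PySem.List.enumerate vs 1 :=
      PySem.List.enumerate_cons ..
    have hhead :
        (PySem.List.sorted (PySem.List.enumerate (v :: vs) 0) (fun x => x.2) true).head? =
          some ((PySem.List.enumerate vs 1).foldl (fun (b : Int × Int) q => if b.2 < q.2 then q else b) ((0 : Int), v)) := by
      rw [PySem.List.sorted_rev_eq_foldl_insertBy, henum, List.foldl_cons]
      have h1 : PySem.List.insertBy (fun a b => decide ((fun x : Int × Int => x.2) b < (fun x : Int × Int => x.2) a)) ((0 : Int), v) ([] : List (Int × Int)) = [((0 : Int), v)] := by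
        simp [PySem.List.insertBy]
      rw [h1]
      exact head_foldl_insertBy _ [((0 : Int), v)] ((0 : Int), v) rfl
    obtain ⟨hd, tl, hsort⟩ : ∃ hd tl, PySem.List.sorted (PySem.List.enumerate (v :: vs) 0) (fun x => x.2) true = hd :: tl := by
      cases hcase : PySem.List.sorted (PySem.List.enumerate (v :: vs) 0) (fun x => x.2) true with
      | nil => rw [hcase] at hhead; simp at hhead
      | cons a b => exact ⟨a, b, rfl⟩
    rw [hsort] at hhead ⊢
    simp only [List.head?_cons, Option.some.injEq] at hhead
    rw [PySem.List.pyGetD_zero_cons, hhead, argmaxGo_eq_foldl]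
    rfl

-- A's accumulator fold over the enumerated rows builds acc ++ B's comprehension
lemma main_fold (sentences1 sentences2 : List String) (lang1 lang2 : String) :
    ∀ (l : List (List Int)) (acc : List (List (String × String))) (c i : Int),
      ((PySem.List.enumerate l i).foldl
        (fun (st : List (List (String × String)) × Int) p =>
          if p.2.sum = 0 then st
          else if p.2.sum > 0 then
            (st.1 ++ [pvRowDict lang1 lang2 (PySem.List.pyGetD sentences1 p.1 "")
              (PySem.List.pyGetD sentences2 (PySem.List.pyGetD (PySem.List.sorted (PySem.List.enumerate p.2 0) (fun x => x.2) true) 0 ((0 : Int), (0 : Int))).1 "")], st.2 + 1)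
          else st)
        (acc, c)).1 =
      acc ++ pvAlignGo sentences1 sentences2 lang1 lang2 l i := by
  intro l
  induction l with
  | nil => intro acc c i; simp [pvAlignGo, PySem.List.enumerate_nil]
  | cons s rest ih =>
    intro acc c i
    rw [PySem.List.enumerate_cons, List.foldl_cons, pvAlignGo]
    by_cases h0 : s.sum = 0
    · rw [if_pos h0, if_neg (by omega : ¬ 0 < s.sum)]
      exact ih acc c (i + 1)
    · by_cases hpos : s.sum > 0
      · have hne : s ≠ [] := by
          intro hnil; rw [hnil] at hpos; simp at hpos
        rw [if_neg h0, if_pos hpos, if_pos hpos, ih, row_eq s hne, List.append_assoc]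
        rfl
      · rw [if_neg h0, if_neg hpos, if_neg (by omega : ¬ 0 < s.sum)]
        exact ih acc c (i + 1)

-- ===== VERDICT (by name: the statement is the Claim_ definition above) =====
theorem find_alignments_spec : Claim_equal_find_alignments := by
  intro similarities sentences1 sentences2 lang1 lang2 _ _
  unfold Spec_find_alignments find_alignments find_alignments_alt
  exact main_fold sentences1 sentences2 lang1 lang2 similarities [] 0 0
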